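-- pv_equiv track=rewrite | github.com/garthtrickett/super-shaper-9000 | apply_changes.py | perfect_replace
-- ===== SOURCE A (Python) =====
-- def perfect_replace(whole_lines, part_lines, replace_lines):
--     """Strategy 1: Exact matching."""
--     part_tup = tuple(part_lines)
--     part_len = len(part_lines)
--
--     if part_len == 0:
--         return "".join(replace_lines + whole_lines)
--
--     for i in range(len(whole_lines) - part_len + 1):
--         if tuple(whole_lines[i : i + part_len]) == part_tup:
--             res = whole_lines[:i] + replace_lines + whole_lines[i + part_len :]
--             return "".join(res)
--     return None
-- ===== SOURCE B (Python) =====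
-- def _kmp_step(part_lines, fail, k, x):
--     """Advance the KMP automaton state k by one element x."""
--     while k > 0 and x != part_lines[k]:
--         k = fail[k - 1]
--     if x == part_lines[k]:
--         k += 1
--     return k
--
--
-- def perfect_replace(whole_lines, part_lines, replace_lines):
--     """Strategy 1: exact matching, via Knuth-Morris-Pratt over the line sequence.
--
--     A failure table for part_lines is built once; a single left-to-right pass
--     over whole_lines then finds the first occurrence, never re-examining
--     earlier lines."""
--     m = len(part_lines)
--     if m == 0:
--         return "".join(replace_lines + whole_lines)
--     fail = [0]
--     k = 0
--     for q in range(1, m):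
--         k = _kmp_step(part_lines, fail, k, part_lines[q])
--         fail.append(k)
--     j = 0
--     for i, line in enumerate(whole_lines):
--         j = _kmp_step(part_lines, fail, j, line)
--         if j == m:
--             start = i + 1 - m
--             return "".join(whole_lines[:start] + replace_lines + whole_lines[i + 1:])
--     return None
-- ===== Notes on version B (the rewrite author's own statement) =====
-- stated objective: alternative
-- what changed: Replaces A's naive scan that builds and compares an m-element slice at every offset with Knuth-Morris-Pratt over the line sequence: a failure table for part_lines is built once and a single pass over whole_lines finds the first occurrence without re-examining lines.
import Mathlib
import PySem

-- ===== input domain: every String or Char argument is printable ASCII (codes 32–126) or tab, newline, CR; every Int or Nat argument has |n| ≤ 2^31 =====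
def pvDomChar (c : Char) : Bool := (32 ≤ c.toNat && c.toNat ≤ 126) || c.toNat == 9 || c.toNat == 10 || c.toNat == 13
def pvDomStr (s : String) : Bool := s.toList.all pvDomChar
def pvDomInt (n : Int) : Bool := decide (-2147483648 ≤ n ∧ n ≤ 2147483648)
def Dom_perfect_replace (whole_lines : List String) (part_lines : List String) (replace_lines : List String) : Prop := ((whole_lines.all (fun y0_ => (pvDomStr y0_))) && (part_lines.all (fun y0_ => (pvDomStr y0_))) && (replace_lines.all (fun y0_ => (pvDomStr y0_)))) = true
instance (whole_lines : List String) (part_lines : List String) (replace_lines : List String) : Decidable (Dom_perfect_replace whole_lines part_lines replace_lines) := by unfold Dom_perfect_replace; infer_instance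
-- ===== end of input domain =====

-- B replaces A's naive scan (an m-element slice compared at every offset) by
-- Knuth–Morris–Pratt over the line sequence: a failure table for part_lines is
-- built once and one pass over whole_lines finds the first occurrence
-- (objective: alternative algorithm).

-- ===== PORT A =====
-- "".join(xs)
def pvJoin (xs : List String) : String := PySem.Str.join "" xs

-- the 'for i in range(...)' loop with its early return
def pvLoopA (whole_lines part_lines replace_lines : List String) : List Int → Option String
  | [] => none
  | i :: rest =>
    if PySem.List.slice whole_lines (some i) (some (i + (part_lines.length : Int))) = part_lines then
      some (pvJoin (PySem.List.slice whole_lines none (some i) ++ replace_lines ++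
                    PySem.List.slice whole_lines (some (i + (part_lines.length : Int))) none))
    else pvLoopA whole_lines part_lines replace_lines rest

def perfect_replace (whole_lines : List String) (part_lines : List String) (replace_lines : List String) : Option String :=
  let part_len : Int := part_lines.length
  if part_len = 0 then some (pvJoin (replace_lines ++ whole_lines))
  else pvLoopA whole_lines part_lines replace_lines
         (PySem.List.pyRange 0 ((whole_lines.length : Int) - part_len + 1) 1)

-- ===== PORT B =====
-- the 'while k > 0 and x != part_lines[k]: k = fail[k-1]' loop of _kmp_step;
-- the 'min … k' clamp only makes the recursion visibly terminating — the fail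
-- values the program builds satisfy fail[k-1] ≤ k-1 (proved below), so it never changes the value
def pvKmpFall (p : List String) (fail : List Nat) (x : String) : Nat → Nat
  | 0 => 0
  | (k+1) => if x == p.getD (k+1) "" then (k+1)
             else pvKmpFall p fail x (min (fail.getD k 0) k)
decreasing_by exact Nat.lt_succ_of_le (min_le_right _ _)

-- the rest of _kmp_step: 'if x == part_lines[k]: k += 1; return k'
def pvKmpStep (p : List String) (fail : List Nat) (k : Nat) (x : String) : Nat :=
  let k' := pvKmpFall p fail x k
  if x == p.getD k' "" then k' + 1 else k'

-- 'fail = [0]; k = 0; for q in range(1, m): k = _kmp_step(...); fail.append(k)'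
def pvBuildFail (p : List String) : List Nat × Nat :=
  (PySem.List.pyRange 1 (p.length : Int) 1).foldl
    (fun st q =>
      let k := pvKmpStep p st.1 st.2 (PySem.List.pyGetD p q "")
      (st.1 ++ [k], k))
    ([0], 0)

-- 'for i, line in enumerate(whole_lines): j = _kmp_step(...); if j == m: return ...'
def pvKmpScan (p : List String) (fail : List Nat) (w r : List String) : List (Int × String) → Nat → Option String
  | [], _ => none
  | (i, line) :: rest, j =>
    let j' := pvKmpStep p fail j line
    if j' = p.length then
      some (pvJoin (PySem.List.slice w none (some (i + 1 - (p.length : Int))) ++ r ++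
                    PySem.List.slice w (some (i + 1)) none))
    else pvKmpScan p fail w r rest j'

def perfect_replace_alt (whole_lines : List String) (part_lines : List String) (replace_lines : List String) : Option String :=
  if part_lines.length = 0 then some (pvJoin (replace_lines ++ whole_lines))
  else pvKmpScan part_lines (pvBuildFail part_lines).1 whole_lines replace_lines
         (PySem.List.enumerate whole_lines 0) 0

-- ===== PRECONDITION & SPEC =====
def Spec_perfect_replace (whole_lines : List String) (part_lines : List String) (replace_lines : List String) (out : Option String) : Prop := out = perfect_replace_alt whole_lines part_lines replace_lines
instance (whole_lines : List String) (part_lines : List String) (replace_lines : List String) (out : Option String) : Decidable (Spec_perfect_replace whole_lines part_lines replace_lines out) := by unfold Spec_perfect_replace; infer_instance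

-- ===== CLAIM (what is proved, stated in full; the proofs are below) =====
def Claim_equal_perfect_replace : Prop := ∀ (whole_lines : List String) (part_lines : List String) (replace_lines : List String), Dom_perfect_replace whole_lines part_lines replace_lines → Spec_perfect_replace whole_lines part_lines replace_lines (perfect_replace whole_lines part_lines replace_lines)

-- ===== LEMMAS AND PROOFS =====

-- the common "build the replaced text at offset i" value
def pvRes (w p r : List String) (i : Int) : String :=
  pvJoin (PySem.List.slice w none (some i) ++ r ++
          PySem.List.slice w (some (i + (p.length : Int))) none)

-- greatest l ≤ c such that the first l lines of p are a suffix of t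
def pvFG (p t : List String) (c : Nat) : Nat :=
  Nat.findGreatest (fun l => p.take l <:+ t) c

-- A's loop is "find the first slice match, build the result there"
theorem pvLoopA_eq_find (w p r : List String) (is : List Int) :
    pvLoopA w p r is =
      (is.find? (fun i => PySem.List.slice w (some i) (some (i + (p.length : Int))) == p)).map (pvRes w p r) := by
  induction is with
  | nil => rfl
  | cons i rest ih =>
    by_cases h : PySem.List.slice w (some i) (some (i + (p.length : Int))) = p
    · simp [pvLoopA, h, pvRes]
    · have hb : (PySem.List.slice w (some i) (some (i + (p.length : Int))) == p) = false := beq_eq_false_iff_ne.mpr h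
      simp [pvLoopA, h, hb, ih]

-- a suffix of a suffix: the shorter of two suffixes of the same list is a suffix of the longer
theorem pv_suffix_nest {α : Type} {l₁ l₂ t : List α} (h1 : l₁ <:+ t) (h2 : l₂ <:+ t)
    (h : l₁.length ≤ l₂.length) : l₁ <:+ l₂ := by
  rw [← List.reverse_prefix] at h1 h2 ⊢
  exact List.prefix_of_prefix_length_le h1 h2 (by simpa using h)

theorem pv_take_succ_eq {α : Type} (p : List α) (d : α) (k : Nat) (hk : k < p.length) :
    p.take (k+1) = p.take k ++ [p.getD k d] := by
  rw [List.take_add_one]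
  simp [List.getElem?_eq_getElem hk]

-- extend a suffix by one element
theorem pv_suffix_snoc {α : Type} {s t : List α} (x : α) (h : s <:+ t) : s ++ [x] <:+ t ++ [x] := by
  obtain ⟨u, rfl⟩ := h
  exact ⟨u, by simp⟩

-- peel one element off a suffix of a snoc
theorem pv_suffix_snoc_inv {α : Type} {s t : List α} {a x : α} (h : s ++ [a] <:+ t ++ [x]) :
    a = x ∧ s <:+ t := by
  obtain ⟨u, hu⟩ := h
  rw [← List.append_assoc] at hu
  have := List.append_inj' hu (by simp)
  refine ⟨by simpa using congrArg (fun l => l.getLast?) this.2, ⟨u, this.1⟩⟩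

-- the while loop descends the border chain: it returns the largest border b of p.take j with x = p[b] (or 0)
theorem pv_fall_spec (p : List String) (fail : List Nat) (x : String) :
    ∀ j : Nat, j ≤ p.length →
    (∀ q, q < j → fail.getD q 0 = pvFG p (p.take (q+1)) q) →
    pvKmpFall p fail x j ≤ j ∧ p.take (pvKmpFall p fail x j) <:+ p.take j ∧
      (pvKmpFall p fail x j = 0 ∨ x = p.getD (pvKmpFall p fail x j) "") ∧
      (∀ b, b ≤ j → p.take b <:+ p.take j → x = p.getD b "" → b ≤ pvKmpFall p fail x j) := by
  intro j
  induction j using Nat.strong_induction_on with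
  | _ j ih =>
    intro hjm Hf
    match j with
    | 0 =>
      rw [pvKmpFall]
      refine ⟨le_refl _, List.suffix_refl _, Or.inl rfl, ?_⟩
      intro b hb _ _; omega
    | (k+1) =>
      by_cases hx : x == p.getD (k+1) ""
      · rw [pvKmpFall, if_pos hx]
        exact ⟨le_refl _, List.suffix_refl _, Or.inr (by simpa using hx), fun b hb _ _ => hb⟩
      · rw [pvKmpFall, if_neg hx]
        have hfk : fail.getD k 0 = pvFG p (p.take (k+1)) k := Hf k (Nat.lt_succ_self k)
        have hfle : fail.getD k 0 ≤ k := by rw [hfk]; exact Nat.findGreatest_le k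
        have hmin : min (fail.getD k 0) k = fail.getD k 0 := min_eq_left hfle
        set f := fail.getD k 0 with hf
        have hfsuf : p.take f <:+ p.take (k+1) := by
          rcases Nat.eq_zero_or_pos f with h0 | h0
          · rw [h0]; simp
          · have := (Nat.findGreatest_eq_iff.mp hfk.symm).2.1 (by omega)
            exact this
        have ihf := ih f (by omega) (by omega) (fun q hq => Hf q (by omega))
        rw [hmin]
        obtain ⟨h1, h2, h3, h4⟩ := ihf
        refine ⟨by omega, h2.trans hfsuf, h3, ?_⟩
        intro b hb hbsuf hbx
        have hbne : b ≠ k+1 := by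
          intro h; subst h; exact hx (by simp [hbx])
        have hble : b ≤ k := by omega
        have hbf : b ≤ f := by
          rw [hfk]; exact Nat.le_findGreatest hble hbsuf
        have hbsuf' : p.take b <:+ p.take f :=
          pv_suffix_nest hbsuf hfsuf (by
            rw [List.length_take, List.length_take]; omega)
        exact h4 b hbf hbsuf' hbx

-- a candidate match into t ++ [x] decomposes: its last line is x and the rest is a border of t
theorem pv_cand (p t : List String) (x : String) (c j n : Nat)
    (hj : j = pvFG p t c) (hjm : j ≤ p.length)
    (hn : 0 < n) (hnm : n ≤ p.length) (hnc : n - 1 ≤ c)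
    (hQ : p.take n <:+ t ++ [x]) :
    x = p.getD (n-1) "" ∧ p.take (n-1) <:+ p.take j := by
  have hdec : p.take n = p.take (n-1) ++ [p.getD (n-1) ""] := by
    have := pv_take_succ_eq p "" (n-1) (by omega)
    rw [show n - 1 + 1 = n by omega] at this
    simpa using this
  rw [hdec] at hQ
  obtain ⟨hx, hsuf⟩ := pv_suffix_snoc_inv hQ
  have hle : n - 1 ≤ j := by
    rw [hj]; exact Nat.le_findGreatest hnc hsuf
  have hjsuf : p.take j <:+ t := by
    rcases Nat.eq_zero_or_pos j with h0 | h0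
    · rw [h0]; simp
    · exact (Nat.findGreatest_eq_iff.mp hj.symm).2.1 (by omega)
  refine ⟨hx.symm, pv_suffix_nest hsuf hjsuf (by rw [List.length_take, List.length_take]; omega)⟩

-- one automaton step computes the new greatest border
theorem pv_step_spec (p : List String) (fail : List Nat) (t : List String) (x : String) (c j : Nat)
    (_hm : p ≠ [])
    (hj : j = pvFG p t c) (hjm : j < p.length)
    (Hf : ∀ q, q < j → fail.getD q 0 = pvFG p (p.take (q+1)) q) :
    pvKmpStep p fail j x = pvFG p (t ++ [x]) (min (c+1) p.length) := by
  obtain ⟨hk_le, hk_suf, hk0, hk_max⟩ := pv_fall_spec p fail x j (by omega) Hf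
  set k := pvKmpFall p fail x j with hkdef
  have hjc : j ≤ c := by rw [hj]; exact Nat.findGreatest_le c
  have hjsuf : p.take j <:+ t := by
    rcases Nat.eq_zero_or_pos j with h0 | h0
    · rw [h0]; simp
    · exact (Nat.findGreatest_eq_iff.mp hj.symm).2.1 (by omega)
  have hstepdef : pvKmpStep p fail j x = (if x == p.getD k "" then k + 1 else k) := by
    simp only [pvKmpStep, ← hkdef]
  by_cases hx : x = p.getD k ""
  · rw [hstepdef, if_pos (beq_iff_eq.mpr hx)]
    symm
    rw [pvFG, Nat.findGreatest_eq_iff]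
    refine ⟨by omega, fun _ => ?_, ?_⟩
    · have hdec : p.take (k+1) = p.take k ++ [x] := by
        rw [pv_take_succ_eq p "" k (by omega), ← hx]
      rw [hdec]
      exact pv_suffix_snoc x (hk_suf.trans hjsuf)
    · intro n hkn hnc hQ
      have ⟨hx', hsuf'⟩ := pv_cand p t x c j n hj (by omega) (by omega) (by omega) (by omega) hQ
      have := hk_max (n-1) (by
        have : n - 1 ≤ j := by rw [hj]; exact Nat.le_findGreatest (by omega) (hsuf'.trans hjsuf)
        omega) hsuf' hx'
      omega
  · rw [hstepdef, if_neg (by simpa using hx)]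
    have hk_eq : k = 0 := by
      rcases hk0 with h | h
      · exact h
      · exact absurd h hx
    rw [hk_eq]
    symm
    rw [pvFG, Nat.findGreatest_eq_zero_iff]
    intro n hn hnc hQ
    have ⟨hx', hsuf'⟩ := pv_cand p t x c j n hj (by omega) (by omega) (by omega) (by omega) hQ
    have hb := hk_max (n-1) (by
        have : n - 1 ≤ j := by rw [hj]; exact Nat.le_findGreatest (by omega) (hsuf'.trans hjsuf)
        omega) hsuf' hx'
    rw [hk_eq] at hb
    have hn1 : n = 1 := by omega
    subst hn1
    exact hx (by rw [hk_eq]; simpa using hx')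

-- getD on an appended singleton
theorem pv_getD_append_lt (l : List Nat) (k : Nat) (q : Nat) (hq : q < l.length) :
    (l ++ [k]).getD q 0 = l.getD q 0 := by
  simp [List.getD, List.getElem?_append_left hq]

theorem pv_getD_append_self (l : List Nat) (k : Nat) :
    (l ++ [k]).getD l.length 0 = k := by
  simp [List.getD]

-- the table-building loop: after processing range(1, Q+1) the list holds the
-- greatest-proper-border values for every prefix of p
theorem pv_build_aux (p : List String) (hp : p ≠ []) :
    ∀ Q : Nat, 1 ≤ Q → Q ≤ p.length →
    ((PySem.List.pyRange 1 (Q : Int) 1).foldl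
      (fun st q =>
        let k := pvKmpStep p st.1 st.2 (PySem.List.pyGetD p q "")
        (st.1 ++ [k], k))
      ([0], 0)).1.length = Q ∧
    (∀ q, q < Q →
      ((PySem.List.pyRange 1 (Q : Int) 1).foldl
        (fun st q =>
          let k := pvKmpStep p st.1 st.2 (PySem.List.pyGetD p q "")
          (st.1 ++ [k], k))
        ([0], 0)).1.getD q 0 = pvFG p (p.take (q+1)) q) ∧
    ((PySem.List.pyRange 1 (Q : Int) 1).foldl
      (fun st q =>
        let k := pvKmpStep p st.1 st.2 (PySem.List.pyGetD p q "")
        (st.1 ++ [k], k))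
      ([0], 0)).2 = pvFG p (p.take Q) (Q-1) := by
  intro Q
  induction Q with
  | zero => omega
  | succ Q ihQ =>
    intro h1 hQm
    rcases Nat.eq_zero_or_pos Q with hQ0 | hQ0
    · subst hQ0
      rw [show ((1:Nat) : Int) = 1 by norm_num, PySem.List.pyRange_one_eq_nil (le_refl 1)]
      refine ⟨rfl, ?_, rfl⟩
      intro q hq
      have hq0 : q = 0 := by omega
      subst hq0
      rfl
    · obtain ⟨hlen, hvals, hk⟩ := ihQ (by omega) (by omega)
      have hsplit : PySem.List.pyRange 1 ((Q+1 : Nat) : Int) 1 =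
          PySem.List.pyRange 1 (Q : Int) 1 ++ [(Q : Int)] := by
        rw [show ((Q+1 : Nat) : Int) = (Q : Int) + 1 by push_cast; ring]
        rw [PySem.List.pyRange_one_succ_right (by exact_mod_cast hQ0)]
      rw [hsplit, List.foldl_append]
      set st := ((PySem.List.pyRange 1 (Q : Int) 1).foldl
        (fun st q =>
          let k := pvKmpStep p st.1 st.2 (PySem.List.pyGetD p q "")
          (st.1 ++ [k], k))
        ([0], 0)) with hst
      have hx : PySem.List.pyGetD p (Q : Int) "" = p.getD Q "" := by
        rw [PySem.List.pyGetD_natCast]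
      have hstep : pvKmpStep p st.1 st.2 (PySem.List.pyGetD p (Q : Int) "") =
          pvFG p (p.take (Q+1)) Q := by
        rw [hx, hk]
        have hjle : pvFG p (p.take Q) (Q-1) ≤ Q - 1 := Nat.findGreatest_le _
        have := pv_step_spec p st.1 (p.take Q) (p.getD Q "") (Q-1)
          (pvFG p (p.take Q) (Q-1)) hp rfl (by omega)
          (fun q hq => hvals q (by omega))
        rw [this]
        have hcap : min (Q-1+1) p.length = Q := by omega
        rw [hcap]
        congr 1
        rw [← pv_take_succ_eq p "" Q (by omega)]
      have hfold : List.foldl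
          (fun st q =>
            let k := pvKmpStep p st.1 st.2 (PySem.List.pyGetD p q "")
            (st.1 ++ [k], k)) st [(Q : Int)] =
          (st.1 ++ [pvFG p (p.take (Q+1)) Q], pvFG p (p.take (Q+1)) Q) := by
        show (st.1 ++ [pvKmpStep p st.1 st.2 (PySem.List.pyGetD p (Q : Int) "")],
              pvKmpStep p st.1 st.2 (PySem.List.pyGetD p (Q : Int) "")) = _
        rw [hstep]
      rw [hfold]
      refine ⟨by simp [hlen], ?_, rfl⟩
      intro q hq
      rcases Nat.lt_or_ge q Q with hlt | hge
      · rw [pv_getD_append_lt st.1 _ q (by omega)]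
        exact hvals q hlt
      · have hqQ : q = Q := by omega
        subst hqQ
        rw [← hlen, pv_getD_append_self]

-- first element of range bound satisfying P, characterised
theorem pv_find?_range_first (P : Nat → Bool) (bound s0 : Nat)
    (h1 : P s0 = true) (h2 : ∀ s, s < s0 → P s = false) (h3 : s0 < bound) :
    (List.range bound).find? P = some s0 := by
  induction bound with
  | zero => omega
  | succ b ihb =>
    rw [List.range_succ, List.find?_append]
    rcases Nat.lt_or_ge s0 b with hlt | hge
    · rw [ihb hlt]
      rfl
    · have hs0b : s0 = b := by omega
      subst hs0b
      have hnone : (List.range s0).find? P = none := by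
        rw [List.find?_eq_none]
        intro s hs
        simp [h2 s (List.mem_range.mp hs)]
      rw [hnone]
      simp [List.find?, h1]

-- the scan loop returns exactly "first match index, result built there"
theorem pv_scan (p : List String) (hp : p ≠ []) (fl : List Nat)
    (Hf : ∀ q, q < p.length → fl.getD q 0 = pvFG p (p.take (q+1)) q)
    (w r : List String) :
    ∀ rem t j, w = t ++ rem → j = pvFG p t p.length → j < p.length →
    (∀ s, s + p.length ≤ t.length → ¬ ((w.drop s).take p.length = p)) →
    pvKmpScan p fl w r (PySem.List.enumerate rem (t.length : Int)) j =
      ((List.range (w.length - p.length + 1)).find?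
        (fun s => decide ((w.drop s).take p.length = p))).map (fun s : Nat => pvRes w p r (s : Int)) := by
  intro rem
  induction rem with
  | nil =>
    intro t j hw hj hjm hinv
    rw [PySem.List.enumerate_nil, pvKmpScan]
    have hnone : (List.range (w.length - p.length + 1)).find?
        (fun s => decide ((w.drop s).take p.length = p)) = none := by
      rw [List.find?_eq_none]
      intro s hs
      simp only [decide_eq_true_eq]
      intro hmatch
      have hlen : ((w.drop s).take p.length).length = p.length := by rw [hmatch]
      have hsw : s + p.length ≤ w.length := by
        rw [List.length_take, List.length_drop] at hlen
        have := List.mem_range.mp hs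
        omega
      have ht : t.length = w.length := by rw [hw]; simp
      exact hinv s (by omega) hmatch
    rw [hnone]
    rfl
  | cons x rest ihrem =>
    intro t j hw hj hjm hinv
    rw [PySem.List.enumerate_cons, pvKmpScan]
    have hstep : pvKmpStep p fl j x = pvFG p (t ++ [x]) p.length := by
      rw [pv_step_spec p fl t x p.length j hp hj hjm (fun q hq => Hf q (by omega))]
      congr 1
      omega
    rw [hstep]
    by_cases hdone : pvFG p (t ++ [x]) p.length = p.length
    · rw [if_pos hdone]
      -- p is a suffix of t ++ [x]
      have hpsuf : p <:+ t ++ [x] := by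
        have := (Nat.findGreatest_eq_iff.mp hdone).2.1 (by
          intro h; exact hp (List.length_eq_zero_iff.mp h))
        simpa using this
      obtain ⟨u, hu⟩ := hpsuf
      have hlensum : u.length + p.length = t.length + 1 := by
        have h := congrArg List.length hu
        rw [List.length_append, List.length_append, List.length_cons] at h
        simpa using h
      have hmle : p.length ≤ t.length + 1 := by omega
      set s0 := t.length + 1 - p.length with hs0
      have hulen : u.length = s0 := by omega
      have hwu : w = u ++ (p ++ rest) := by
        rw [hw, show t ++ x :: rest = (t ++ [x]) ++ rest by simp, ← hu]
        simp
      have hmatch : ((w.drop s0).take p.length = p) := by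
        rw [hwu, ← hulen, List.drop_left, List.take_left]
      have hmin : ∀ s, s < s0 → ¬ ((w.drop s).take p.length = p) := by
        intro s hs hm
        have hlen : ((w.drop s).take p.length).length = p.length := by rw [hm]
        rw [List.length_take, List.length_drop] at hlen
        exact hinv s (by omega) hm
      have hbound : s0 < w.length - p.length + 1 := by
        have : t.length + 1 ≤ w.length := by
          rw [hw, List.length_append, List.length_cons]
          omega
        omega
      have h1 : (t.length : Int) + 1 - (p.length : Int) = (s0 : Int) := by
        rw [hs0]; omega
      have h2 : (t.length : Int) + 1 = (s0 : Int) + (p.length : Int) := by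
        rw [hs0]; omega
      rw [pv_find?_range_first _ _ s0 (by simp [hmatch]) (fun s hs => by simp [hmin s hs]) hbound]
      rw [Option.map_some, pvRes, h1, h2]
    · rw [if_neg hdone]
      have hjm' : pvFG p (t ++ [x]) p.length < p.length := by
        have := Nat.findGreatest_le (P := fun l => p.take l <:+ t ++ [x]) p.length
        rw [pvFG] at hdone ⊢
        omega
      have hw' : w = (t ++ [x]) ++ rest := by rw [hw]; simp
      have hinv' : ∀ s, s + p.length ≤ (t ++ [x]).length → ¬ ((w.drop s).take p.length = p) := by
        intro s hs hm
        have hs' : s + p.length ≤ t.length + 1 := by simpa using hs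
        rcases Nat.lt_or_ge (s + p.length) (t.length + 1) with hlt | hge
        · exact hinv s (by omega) hm
        · -- the match ends exactly at t ++ [x]: then p is a suffix of t ++ [x], contradicting hdone
          have hse : s + p.length = t.length + 1 := by omega

          have htx : (t ++ [x]) = w.take (s + p.length) := by
            rw [hw', List.take_left']
            rw [List.length_append]
            simpa using hse.symm
          have hps : p <:+ t ++ [x] := by
            refine ⟨w.take s, ?_⟩
            rw [htx, List.take_add, hm]
          have : p.length ≤ pvFG p (t ++ [x]) p.length := by
            rw [pvFG]
            exact Nat.le_findGreatest (le_refl _) (by simpa using hps)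
          omega
      have hcast : (t.length : Int) + 1 = (((t ++ [x]).length : Nat) : Int) := by
        simp
      rw [hcast]
      exact ihrem (t ++ [x]) _ hw' rfl hjm' hinv'

-- find? only looks at the predicate's values on members
theorem pv_find?_congr {α : Type} (l : List α) (p q : α → Bool)
    (h : ∀ x ∈ l, p x = q x) : l.find? p = l.find? q := by
  induction l with
  | nil => rfl
  | cons x xs ih =>
    have hx := h x List.mem_cons_self
    by_cases hp : p x
    · simp [List.find?, hp, hx ▸ hp]
    · have hq : q x = false := by rw [← hx]; simpa using hp
      simp [List.find?, hp, hq, ih (fun y hy => h y (List.mem_cons_of_mem _ hy))]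

-- the A-side loop equals the same "first match" expression
theorem pv_A_eq_find (w p r : List String) (hp : p ≠ []) :
    perfect_replace w p r =
      ((List.range (w.length - p.length + 1)).find?
        (fun s => decide ((w.drop s).take p.length = p))).map (fun s : Nat => pvRes w p r (s : Int)) := by
  have hm0 : (p.length : Int) ≠ 0 := by
    simp [List.length_eq_zero_iff, hp]
  simp only [perfect_replace]
  rw [if_neg hm0, pvLoopA_eq_find]
  rcases Nat.lt_or_ge w.length p.length with hlt | hge
  · -- pattern longer than text: both sides are none
    have hr : PySem.List.pyRange 0 ((w.length : Int) - (p.length : Int) + 1) 1 = [] := by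
      apply PySem.List.pyRange_one_eq_nil
      omega
    rw [hr]
    have hnone : (List.range (w.length - p.length + 1)).find?
        (fun s => decide ((w.drop s).take p.length = p)) = none := by
      rw [List.find?_eq_none]
      intro s hs
      simp only [decide_eq_true_eq]
      intro hm
      have hlen : ((w.drop s).take p.length).length = p.length := by rw [hm]
      rw [List.length_take, List.length_drop] at hlen
      omega
    rw [hnone]
    rfl
  · have hK : ((w.length : Int) - (p.length : Int) + 1) - 0 = ((w.length - p.length + 1 : Nat) : Int) := by
      push_cast [hge]
      omega
    rw [PySem.List.pyRange_one, hK, Int.toNat_natCast, List.find?_map, Option.map_map]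
    have hcongr : ∀ s ∈ List.range (w.length - p.length + 1),
        ((fun i => PySem.List.slice w (some i) (some (i + (p.length : Int))) == p) ∘
          (fun k : Nat => (0 : Int) + k)) s =
        (fun s => decide ((w.drop s).take p.length = p)) s := by
      intro s hs
      simp only [Function.comp_apply, zero_add]
      rw [show (s : Int) + (p.length : Int) = ((s + p.length : Nat) : Int) by push_cast; ring]
      rw [PySem.List.slice_natCast]
      rw [show s + p.length - s = p.length by omega]
      rcases Bool.decide_iff ((w.drop s).take p.length = p) with _
      by_cases h : (w.drop s).take p.length = p
      · simp [h]
      · simp [h]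
    rw [pv_find?_congr _ _ _ hcongr]
    congr 1
    funext s
    simp

theorem pv_main (w p r : List String) : perfect_replace w p r = perfect_replace_alt w p r := by
  rcases List.eq_nil_or_concat' p with hp | ⟨_, _, hne⟩
  · subst hp
    rfl
  · have hp : p ≠ [] := by subst hne; simp
    have hm0 : p.length ≠ 0 := by simp [List.length_eq_zero_iff, hp]
    rw [pv_A_eq_find w p r hp, perfect_replace_alt, if_neg hm0]
    obtain ⟨hlen, hvals, _⟩ := pv_build_aux p hp p.length (by omega) (le_refl _)
    have hj0 : (0 : Nat) = pvFG p [] p.length := by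
      symm
      rw [pvFG, Nat.findGreatest_eq_zero_iff]
      intro n hn hnm hsuf
      have h1 : p.take n = [] := List.suffix_nil.mp hsuf
      have h2 : (p.take n).length = 0 := by rw [h1]; rfl
      rw [List.length_take] at h2
      omega
    have hinv0 : ∀ s : Nat, s + p.length ≤ (List.length ([] : List String)) →
        ¬ ((w.drop s).take p.length = p) := by
      intro s hs _
      have hz : s + p.length ≤ 0 := by simpa using hs
      omega
    have hscan := pv_scan p hp (pvBuildFail p).1
      (fun q hq => hvals q hq) w r w [] 0 (by simp) hj0 (by omega) hinv0
    rw [show ((List.length ([] : List String) : Nat) : Int) = 0 by simp] at hscan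
    rw [hscan]

-- ===== VERDICT (by name: the statement is the Claim_ definition above) =====
theorem perfect_replace_spec : Claim_equal_perfect_replace := by
  intro w p r _
  unfold Spec_perfect_replace
  exact pv_main w p r
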